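-- pv_equiv track=rewrite | github.com/vam-sin/riboclette | riboclette/main.py | sequence2codonids
-- ===== SOURCE A (Python) =====
-- import itertools
--
-- def sequence2codonids(seq):
--     '''
--     converts nt sequence into one-hot codon ids
--     '''
--     id_to_codon = {idx:''.join(el) for idx, el in enumerate(itertools.product(['A', 'T', 'C', 'G'], repeat=3))}
--     codon_to_id = {v:k for k,v in id_to_codon.items()}
--     codon_ids = []
--     for i in range(0, len(seq), 3):
--         codon = seq[i:i+3]
--         if len(codon) == 3:
--             codon_ids.append(codon_to_id[codon])
--
--     return codon_ids
-- ===== SOURCE B (Python) =====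
-- def sequence2codonids(seq):
--     '''
--     converts nt sequence into one-hot codon ids
--     '''
--     m = {'A': 0, 'T': 1, 'C': 2, 'G': 3}
--     return [16 * m[seq[i]] + 4 * m[seq[i + 1]] + m[seq[i + 2]]
--             for i in range(0, len(seq) - 2, 3)]
-- ===== Notes on version B (the rewrite author's own statement) =====
-- stated objective: simpler
-- what changed: Replaces the two 64-entry codon<->id tables built with itertools.product by a single 4-entry nucleotide map, computing each codon id arithmetically as 16*d0+4*d1+d2 in one list comprehension; Pre_ excludes inputs containing a non-ATCG character inside a complete codon, on which both programs raise KeyError.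
import Mathlib
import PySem

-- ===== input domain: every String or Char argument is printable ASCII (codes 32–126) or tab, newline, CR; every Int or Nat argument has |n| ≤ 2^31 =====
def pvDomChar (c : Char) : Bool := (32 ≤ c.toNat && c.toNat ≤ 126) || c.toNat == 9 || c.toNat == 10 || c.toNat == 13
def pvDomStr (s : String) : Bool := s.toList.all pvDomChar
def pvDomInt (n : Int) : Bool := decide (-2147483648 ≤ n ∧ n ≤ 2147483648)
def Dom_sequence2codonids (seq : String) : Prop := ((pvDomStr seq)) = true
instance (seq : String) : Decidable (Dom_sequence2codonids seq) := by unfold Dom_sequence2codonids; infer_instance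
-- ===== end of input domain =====

-- B replaces A's two 64-entry codon tables by per-nucleotide digits combined arithmetically
-- in base 4 (objective: simpler — one comprehension, no tables).

-- ===== PORT A =====
-- ['A', 'T', 'C', 'G']
def pvNts : List Char := ['A', 'T', 'C', 'G']
-- itertools.product(['A','T','C','G'], repeat=3); ''.join(el) is the 3-char codon (List Char on the Chars side)
def pvProduct3 : List (List Char) :=
  pvNts.flatMap fun a => pvNts.flatMap fun b => pvNts.map fun c => [a, b, c]
-- id_to_codon = {idx: ''.join(el) for idx, el in enumerate(...)}
def pvIdToCodon : PySem.Dict Int (List Char) :=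
  (PySem.List.enumerate pvProduct3 0).foldl (fun d p => d.insert p.1 p.2) PySem.Dict.empty
-- codon_to_id = {v: k for k, v in id_to_codon.items()}
def pvCodonToId : PySem.Dict (List Char) Int :=
  pvIdToCodon.items.foldl (fun d p => d.insert p.2 p.1) PySem.Dict.empty

-- codon_to_id[codon] raises KeyError on an unknown codon: those inputs are outside Pre_;
-- the -1 default is never reached inside Pre_.
def sequence2codonids (seq : String) : List Int :=
  (PySem.List.pyRange 0 (PySem.Str.len seq) 3).foldl
    (fun acc i =>
      let codon := PySem.List.slice seq.toList (some i) (some (i + 3))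
      if codon.length == 3 then acc ++ [pvCodonToId.getD codon (-1)] else acc) []

-- ===== PORT B =====
-- m = {'A': 0, 'T': 1, 'C': 2, 'G': 3}
def pvM : PySem.Dict Char Int :=
  ((((PySem.Dict.empty : PySem.Dict Char Int)).insert 'A' 0).insert 'T' 1).insert 'C' 2 |>.insert 'G' 3

-- m[seq[i]] raises KeyError on a non-ATCG character: outside Pre_; every index in the
-- range is in bounds (i + 2 ≤ len - 1), so the pyGetD default ' ' is never reached.
def sequence2codonids_alt (seq : String) : List Int :=
  (PySem.List.pyRange 0 (PySem.Str.len seq - 2) 3).map fun i =>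
    16 * pvM.getD (PySem.List.pyGetD seq.toList i ' ') (-1) +
    4 * pvM.getD (PySem.List.pyGetD seq.toList (i + 1) ' ') (-1) +
    pvM.getD (PySem.List.pyGetD seq.toList (i + 2) ' ') (-1)

-- ===== PRECONDITION & SPEC =====
-- Pre_ excludes exactly the inputs on which A raises KeyError: a character other than
-- A/T/C/G inside a complete (length-3) codon; B raises KeyError there too.
def Pre_sequence2codonids (seq : String) : Prop :=
  (seq.toList.take (3 * (seq.toList.length / 3))).all (fun c => pvNts.contains c) = true
instance (seq : String) : Decidable (Pre_sequence2codonids seq) := by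
  unfold Pre_sequence2codonids; infer_instance

def pvWitness_sequence2codonids : String := "ATG"

def Spec_sequence2codonids (seq : String) (out : List Int) : Prop := out = sequence2codonids_alt seq
instance (seq : String) (out : List Int) : Decidable (Spec_sequence2codonids seq out) := by unfold Spec_sequence2codonids; infer_instance

-- ===== CLAIM (what is proved, stated in full; the proofs are below) =====
def Claim_equal_sequence2codonids : Prop := ∀ (seq : String), Dom_sequence2codonids seq → Pre_sequence2codonids seq → Spec_sequence2codonids seq (sequence2codonids seq)

-- ===== LEMMAS AND PROOFS =====

-- the 64-entry reverse table agrees with base-4 arithmetic on valid nucleotides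
set_option maxRecDepth 8192 in
lemma pvCodonToId_eq (a b c : Char) (ha : a ∈ pvNts) (hb : b ∈ pvNts) (hc : c ∈ pvNts) :
    pvCodonToId.getD [a, b, c] (-1) =
      16 * pvM.getD a (-1) + 4 * pvM.getD b (-1) + pvM.getD c (-1) := by
  fin_cases ha <;> fin_cases hb <;> fin_cases hc <;> decide

lemma pv_filter_range_lt (m c : Nat) (h : m ≤ c) :
    (List.range c).filter (fun k => decide (k < m)) = List.range m := by
  obtain ⟨d, rfl⟩ := Nat.le.dest h
  rw [List.range_add, List.filter_append]
  rw [List.filter_eq_self.2 (by intro k hk; simp [List.mem_range.1 hk]),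
      List.filter_eq_nil_iff.2 (by intro k hk; simp at hk ⊢; omega), List.append_nil]

theorem sequence2codonids_spec : Claim_equal_sequence2codonids := by
  intro seq _ hpre0
  have hpre : ∀ c ∈ seq.toList.take (3 * (seq.toList.length / 3)), c ∈ pvNts := by
    intro c hc
    have := List.all_eq_true.1 hpre0 c hc
    simpa using this
  unfold Spec_sequence2codonids sequence2codonids sequence2codonids_alt
  set l := seq.toList with hl
  set n := l.length with hn
  have hlen : PySem.Str.len seq = (n : Int) := by simp [hl, hn]
  rw [hlen]
  rw [PySem.List.foldl_append_if
        (fun i => (PySem.List.slice l (some i) (some (i + 3))).length == 3)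
        (fun i => pvCodonToId.getD (PySem.List.slice l (some i) (some (i + 3))) (-1))]
  rw [PySem.List.pyRange_of_pos 0 (n : Int) (by norm_num),
      PySem.List.pyRange_of_pos 0 ((n : Int) - 2) (by norm_num)]
  have hslice : ∀ k : Nat, PySem.List.slice l (some ((0:Int) + 3 * (k:Int))) (some ((0:Int) + 3 * (k:Int) + 3)) = (l.drop (3 * k)).take 3 := by
    intro k
    have h03 : (0:Int) + 3 * (k:Int) = ((3 * k : Nat) : Int) := by push_cast; ring
    have h33 : (0:Int) + 3 * (k:Int) + 3 = ((3 * k + 3 : Nat) : Int) := by push_cast; ring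
    rw [h33, h03, PySem.List.slice_natCast]
    congr 1
    omega
  have hcB : (if (0:Int) < (n : Int) - 2 then ((((n : Int) - 2) - 0 + 3 - 1) / 3).toNat else 0) = n / 3 := by
    split_ifs with h <;> omega
  rw [hcB, List.filter_map]
  have hfilt : List.filter ((fun i => (PySem.List.slice l (some i) (some (i + 3))).length == 3) ∘ (fun k : Nat => (0:Int) + 3 * (k:Int))) (List.range (if (0:Int) < (n : Int) then (((n : Int) - 0 + 3 - 1) / 3).toNat else 0)) = List.range (n / 3) := by
    rw [List.filter_congr (q := fun k => decide (k < n / 3)) ?_]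
    · exact pv_filter_range_lt _ _ (by split_ifs <;> omega)
    · intro k _
      simp only [Function.comp]
      rw [hslice k]
      simp only [List.length_take, List.length_drop, beq_eq_decide, decide_eq_decide]
      omega
  rw [hfilt]
  simp only [List.nil_append, List.map_map]
  apply List.map_congr_left
  intro k hk
  have hkm : k < n / 3 := List.mem_range.1 hk
  have hk3 : 3 * k + 2 < n := by omega
  simp only [Function.comp]
  rw [hslice k]
  have h1 : 3 * k < n := by omega
  have h2 : 3 * k + 1 < n := by omega
  rw [List.drop_eq_getElem_cons h1, List.drop_eq_getElem_cons (by omega : 3 * k + 1 < l.length),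
      List.drop_eq_getElem_cons (by omega : 3 * k + 1 + 1 < l.length)]
  have htake : ∀ (a b c : Char) (t : List Char), List.take 3 (a :: b :: c :: t) = [a, b, c] := fun _ _ _ _ => rfl
  rw [htake]
  -- membership of each read character in pvNts, from Pre_
  have hmem : ∀ (i : Nat) (h : i < l.length), i < 3 * (n / 3) → l[i]'h ∈ pvNts := by
    intro i h hi
    apply hpre
    have hlt : i < (l.take (3 * (n / 3))).length := by
      simp only [List.length_take]
      omega
    have hgt := List.getElem_take (xs := l) (j := 3 * (n / 3)) (i := i) (h := hlt)
    rw [← hgt]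
    exact List.getElem_mem hlt
  -- rewrite the three pyGetD reads to getElem
  have hg0 : PySem.List.pyGetD l ((0:Int) + 3 * (k:Int)) ' ' = l[3 * k]'(by omega) := by
    have h03 : (0:Int) + 3 * (k:Int) = ((3 * k : Nat) : Int) := by push_cast; ring
    rw [h03, PySem.List.pyGetD_natCast, List.getD_eq_getElem l ' ' (by omega)]
  have hg1 : PySem.List.pyGetD l ((0:Int) + 3 * (k:Int) + 1) ' ' = l[3 * k + 1]'(by omega) := by
    have h03 : (0:Int) + 3 * (k:Int) + 1 = ((3 * k + 1 : Nat) : Int) := by push_cast; ring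
    rw [h03, PySem.List.pyGetD_natCast, List.getD_eq_getElem l ' ' (by omega)]
  have hg2 : PySem.List.pyGetD l ((0:Int) + 3 * (k:Int) + 2) ' ' = l[3 * k + 2]'(by omega) := by
    have h03 : (0:Int) + 3 * (k:Int) + 2 = ((3 * k + 2 : Nat) : Int) := by push_cast; ring
    rw [h03, PySem.List.pyGetD_natCast, List.getD_eq_getElem l ' ' (by omega)]
  rw [hg0, hg1, hg2]
  exact pvCodonToId_eq _ _ _ (hmem _ (by omega) (by omega)) (hmem _ (by omega) (by omega)) (hmem _ (by omega) (by omega))
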